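-- pv_equiv track=rewrite | github.com/airstandley/AdventofCode | 2019/Python/Day_12/solution.py | find_least_common_multiple
-- ===== SOURCE A (Python) =====
-- def find_least_common_multiple(values):
--     i = 2  # Skip 1
--     max_value = min(*values)
--     while i <= max_value:
--         for v in values:
--             if v % i != 0:
--                 break
--         else:
--             return i
--         i += 1
--     return None
-- ===== SOURCE B (Python) =====
-- def find_least_common_multiple(values):
--     m = min(values)
--     if m < 2:
--         return None
--     g = 0
--     for v in values:
--         a, b = g, v
--         while b:
--             a, b = b, a % b
--         g = a
--     d = 2
--     while d * d <= g:
--         if g % d == 0: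
--             return d
--         d += 1
--     return g if g >= 2 else None
-- ===== Notes on version B (the rewrite author's own statement) =====
-- stated objective: alternative
-- what changed: Instead of trial-dividing every value by each candidate i up to min(values), B folds Euclid's algorithm once to get the gcd of all values and then finds its smallest factor by trial division only up to sqrt(gcd), returning the gcd itself if none is found.
import Mathlib
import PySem

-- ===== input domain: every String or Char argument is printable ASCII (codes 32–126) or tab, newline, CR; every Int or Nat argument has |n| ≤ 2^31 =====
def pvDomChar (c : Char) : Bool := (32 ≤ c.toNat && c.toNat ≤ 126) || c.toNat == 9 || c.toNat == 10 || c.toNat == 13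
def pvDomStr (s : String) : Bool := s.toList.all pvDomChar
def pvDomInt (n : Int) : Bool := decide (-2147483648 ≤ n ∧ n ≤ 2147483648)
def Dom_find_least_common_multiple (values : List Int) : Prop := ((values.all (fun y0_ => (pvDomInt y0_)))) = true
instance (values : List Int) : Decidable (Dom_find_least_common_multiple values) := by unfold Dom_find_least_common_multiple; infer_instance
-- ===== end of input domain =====

-- B replaces A's scan of candidates 2..min(values) (each tested against every value)
-- by one gcd fold plus trial division up to sqrt(gcd): a different algorithm ('alternative').


-- ===== PORT A =====
-- the inner 'for v in values: if v % i != 0: break / else: return i'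
def pyAllDiv (values : List Int) (i : Int) : Bool :=
  values.all (fun v => PySem.Int.mod v i == 0)

-- 'while i <= max_value' with fuel = number of remaining candidates
def loopA (values : List Int) : Int → Nat → Option Int
  | _, 0 => none
  | i, n + 1 => if pyAllDiv values i then some i else loopA values (i + 1) n

def find_least_common_multiple (values : List Int) : Option Int :=
  match PySem.List.min? values (fun x => x) with
  | none => none   -- min(*values) raises on empty/singleton; excluded by Pre_
  | some m => loopA values 2 (m - 1).toNat   -- i = 2 .. m

-- ===== PORT B =====
-- 'while b: a, b = b, a % b'; |b| strictly decreases, so fuel |b|+1 is never exhausted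
def euclid : Int → Int → Nat → Int
  | a, _, 0 => a
  | a, b, n + 1 => if b = 0 then a else euclid b (PySem.Int.mod a b) n

-- 'while d * d <= g' with generous fuel
def spfLoop (g : Int) : Int → Nat → Option Int
  | _, 0 => none
  | d, n + 1 =>
    if d * d ≤ g then
      if PySem.Int.mod g d == 0 then some d else spfLoop g (d + 1) n
    else if g ≥ 2 then some g else none

def find_least_common_multiple_alt (values : List Int) : Option Int :=
  match PySem.List.min? values (fun x => x) with
  | none => none   -- min(values) raises on empty; excluded by Pre_
  | some m =>
    if m < 2 then none
    else
      let g := values.foldl (fun g v => euclid g v (v.natAbs + 1)) 0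
      spfLoop g 2 (g.toNat + 1)

-- ===== PRECONDITION & SPEC =====
-- Pre_ excludes lists of length < 2: there A's 'min(*values)' raises TypeError (empty or single argument).
def Pre_find_least_common_multiple (values : List Int) : Prop := 2 ≤ values.length
instance (values : List Int) : Decidable (Pre_find_least_common_multiple values) := by
  unfold Pre_find_least_common_multiple; infer_instance

def pvWitness_find_least_common_multiple : List Int := [4, 6]

def Spec_find_least_common_multiple (values : List Int) (out : Option Int) : Prop :=
  out = find_least_common_multiple_alt values
instance (values : List Int) (out : Option Int) : Decidable (Spec_find_least_common_multiple values out) := by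
  unfold Spec_find_least_common_multiple; infer_instance

-- ===== CLAIM (what is proved, stated in full; the proofs are below) =====
def Claim_equal_find_least_common_multiple : Prop :=
  ∀ (values : List Int), Dom_find_least_common_multiple values →
    Pre_find_least_common_multiple values →
    Spec_find_least_common_multiple values (find_least_common_multiple values)

-- ===== LEMMAS AND PROOFS =====

theorem euclid_eq_gcd : ∀ (n k m : Nat), k < n → euclid (m : Int) (k : Int) n = (Nat.gcd m k : Int) := by
  intro n
  induction n with
  | zero => intro k m h; omega
  | succ n ih =>
    intro k m _h
    by_cases hk : k = 0
    · subst hk; simp [euclid]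
    · rw [euclid]
      have hkpos : (0 : Int) < (k : Int) := by exact_mod_cast Nat.pos_of_ne_zero hk
      have hmod : PySem.Int.mod (m : Int) (k : Int) = ((m % k : Nat) : Int) := by
        rw [PySem.Int.mod_eq_emod_of_pos hkpos]; exact_mod_cast rfl
      have hlt : m % k < n := by
        have h1 : m % k < k := Nat.mod_lt _ (Nat.pos_of_ne_zero hk)
        omega
      rw [if_neg (by exact_mod_cast hk), hmod, ih (m % k) k hlt]
      norm_cast
      rw [Nat.gcd_comm k (m % k), ← Nat.gcd_rec, Nat.gcd_comm]

-- the euclid fold over nonnegative values is the Nat gcd fold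
theorem euclid_fold (values : List Int) (h : ∀ v ∈ values, 0 ≤ v) :
    ∀ g0 : Nat, values.foldl (fun g v => euclid g v (v.natAbs + 1)) (g0 : Int) =
      ((values.foldl (fun g v => Int.gcd (g : Int) v) g0 : Nat) : Int) := by
  induction values with
  | nil => intro g0; simp
  | cons v t ih =>
    intro g0
    have hv : 0 ≤ v := h v (by simp)
    obtain ⟨k, rfl⟩ := Int.eq_ofNat_of_zero_le hv
    have hacc : Int.gcd (g0 : Int) ((k : Nat) : Int) = Nat.gcd g0 k := by simp [Int.gcd]
    have hna : ((k : Int)).natAbs = k := Int.natAbs_natCast k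
    simp only [List.foldl_cons]
    rw [hna, euclid_eq_gcd (k + 1) k g0 (by omega), ih (fun w hw => h w (by simp [hw])) (Nat.gcd g0 k), hacc]

theorem gcdFold_dvd (values : List Int) :
    ∀ g0 : Nat, ((values.foldl (fun g v => Int.gcd (g : Int) v) g0 : Nat) : Int) ∣ (g0 : Int) ∧
      ∀ v ∈ values, ((values.foldl (fun g v => Int.gcd (g : Int) v) g0 : Nat) : Int) ∣ v := by
  induction values with
  | nil => intro g0; simp
  | cons v t ih =>
    intro g0
    obtain ⟨h1, h2⟩ := ih (Int.gcd (g0 : Int) v)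
    have hdg : ((t.foldl (fun g v => Int.gcd (g : Int) v) (Int.gcd (g0 : Int) v) : Nat) : Int) ∣ (Int.gcd (g0 : Int) v : Int) := h1
    refine ⟨?_, ?_⟩
    · exact dvd_trans hdg (Int.gcd_dvd_left _ _)
    · intro w hw
      rcases List.mem_cons.mp hw with rfl | hw
      · exact dvd_trans hdg (Int.gcd_dvd_right _ _)
      · exact h2 w hw

theorem dvd_gcdFold (values : List Int) (d : Int) :
    ∀ g0 : Nat, d ∣ (g0 : Int) → (∀ v ∈ values, d ∣ v) →
      d ∣ ((values.foldl (fun g v => Int.gcd (g : Int) v) g0 : Nat) : Int) := by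
  induction values with
  | nil => intro g0 h _; simpa using h
  | cons v t ih =>
    intro g0 hg hv
    simp only [List.foldl_cons]
    apply ih
    · have h1 : ((d.natAbs : Nat) : Int) ∣ (g0 : Int) := Int.natAbs_dvd.mpr hg
      have h2 : ((d.natAbs : Nat) : Int) ∣ v := Int.natAbs_dvd.mpr (hv v (by simp))
      have := Int.dvd_gcd h1 h2
      exact Int.natAbs_dvd.mp (Int.natCast_dvd_natCast.mpr this)
    · exact fun w hw => hv w (by simp [hw])

-- pyAllDiv characterisation
theorem pyAllDiv_iff (values : List Int) (i : Int) :
    pyAllDiv values i = true ↔ ∀ v ∈ values, i ∣ v := by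
  simp [pyAllDiv, List.all_eq_true, PySem.Int.mod_eq_zero_iff_dvd]

-- loopA characterisations
theorem loopA_none (values : List Int) :
    ∀ (n : Nat) (i : Int), (∀ j : Int, i ≤ j → j < i + n → pyAllDiv values j = false) →
      loopA values i n = none := by
  intro n
  induction n with
  | zero => intro i _; rfl
  | succ n ih =>
    intro i h
    rw [loopA]
    rw [h i le_rfl (by omega)]
    simp only [Bool.false_eq_true, if_false]
    exact ih (i + 1) (fun j h1 h2 => h j (by omega) (by omega))

theorem loopA_found (values : List Int) (k : Int) (hk : pyAllDiv values k = true)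
    (hmin : ∀ j : Int, 2 ≤ j → j < k → pyAllDiv values j = false) :
    ∀ (n : Nat) (i : Int), 2 ≤ i → i ≤ k → k + 1 ≤ i + n → loopA values i n = some k := by
  intro n
  induction n with
  | zero => intro i _ _ _; omega
  | succ n ih =>
    intro i h2 hik hfuel
    rw [loopA]
    by_cases hek : i = k
    · subst hek; rw [hk]; simp
    · rw [hmin i h2 (by omega)]
      simp only [Bool.false_eq_true, if_false]
      exact ih (i + 1) (by omega) (by omega) (by omega)

-- spfLoop characterisations
theorem spfLoop_stop (g : Int) (hnd : ∀ j : Int, 2 ≤ j → j * j ≤ g → ¬ j ∣ g) :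
    ∀ (n : Nat) (d : Int), 2 ≤ d → 1 ≤ n → g + 1 ≤ d + n →
      spfLoop g d n = if g ≥ 2 then some g else none := by
  intro n
  induction n with
  | zero => intro d _ h _; omega
  | succ n ih =>
    intro d h2 _ hfuel
    rw [spfLoop]
    by_cases hdd : d * d ≤ g
    · have hnddvd : ¬ d ∣ g := hnd d h2 hdd
      have : (PySem.Int.mod g d == 0) = false := by
        simp [PySem.Int.mod_eq_zero_iff_dvd, hnddvd]
      rw [if_pos hdd, this]
      simp only [Bool.false_eq_true, if_false]
      have h2d : 2 * d ≤ d * d := by nlinarith [mul_nonneg (by omega : (0:Int) ≤ d - 2) (by omega : (0:Int) ≤ d)]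
      have hn1 : 1 ≤ n := by omega
      exact ih (d + 1) (by omega) hn1 (by omega)
    · rw [if_neg hdd]

theorem spfLoop_found (g : Int) (p : Int) (h2p : 2 ≤ p) (hpp : p * p ≤ g)
    (hdvd : p ∣ g) (hmin : ∀ j : Int, 2 ≤ j → j < p → ¬ j ∣ g) :
    ∀ (n : Nat) (d : Int), 2 ≤ d → d ≤ p → p + 1 ≤ d + n → spfLoop g d n = some p := by
  intro n
  induction n with
  | zero => intro d _ _ _; omega
  | succ n ih =>
    intro d h2 hdp hfuel
    rw [spfLoop]
    by_cases hed : d = p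
    · subst hed
      rw [if_pos hpp]
      have : (PySem.Int.mod g d == 0) = true := by
        simp [PySem.Int.mod_eq_zero_iff_dvd, hdvd]
      rw [this]; simp
    · have hdlt : d < p := lt_of_le_of_ne hdp hed
      have hdd : d * d ≤ g := by
        have : d * d ≤ p * p :=
          mul_le_mul (le_of_lt hdlt) (le_of_lt hdlt) (by omega) (by omega)
        omega
      rw [if_pos hdd]
      have : (PySem.Int.mod g d == 0) = false := by
        simp [PySem.Int.mod_eq_zero_iff_dvd, hmin d h2 hdlt]
      rw [this]
      simp only [Bool.false_eq_true, if_false]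
      exact ih (d + 1) (by omega) (by omega) (by omega)

-- ===== VERDICT (by name: the statement is the Claim_ definition above) =====
theorem find_least_common_multiple_spec : Claim_equal_find_least_common_multiple := by
  intro values _ hpre
  unfold Spec_find_least_common_multiple
  unfold Pre_find_least_common_multiple at hpre
  have hne : values ≠ [] := by intro h; subst h; simp at hpre
  obtain ⟨m, hm⟩ : ∃ m, PySem.List.min? values (fun x => x) = some m := by
    rcases h : PySem.List.min? values (fun x => x) with _ | m
    · exact absurd ((PySem.List.min?_eq_none_iff values (fun x => x)).mp h) hne
    · exact ⟨m, rfl⟩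
  have hmem : m ∈ values := PySem.List.min?_mem hm
  have hmle : ∀ v ∈ values, m ≤ v := by
    intro v hv; exact PySem.List.min?_isMin hm v hv
  simp only [find_least_common_multiple, find_least_common_multiple_alt, hm]
  by_cases hm2 : m < 2
  · -- loop never runs; B returns none too
    have : (m - 1).toNat = 0 := by omega
    rw [this, if_pos hm2]; rfl
  · push_neg at hm2
    rw [if_neg (by omega)]
    have hvpos : ∀ v ∈ values, 0 ≤ v := fun v hv => le_trans (by omega) (hmle v hv)
    set G : Nat := values.foldl (fun g v => Int.gcd (g : Int) v) 0 with hG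
    have hfold : values.foldl (fun g v => euclid g v (v.natAbs + 1)) 0 = (G : Int) := by
      have := euclid_fold values hvpos 0
      simpa using this
    have hGdvd : ∀ v ∈ values, (G : Int) ∣ v := (gcdFold_dvd values 0).2
    have hdvdG : ∀ d : Int, (∀ v ∈ values, d ∣ v) → d ∣ (G : Int) := by
      intro d h; exact dvd_gcdFold values d 0 (by simp) h
    have hGm : (G : Int) ∣ m := hGdvd m hmem
    have hG1 : 1 ≤ G := by
      rcases Nat.eq_zero_or_pos G with h0 | h1
      · exfalso; rw [h0] at hGm; simp at hGm; omega
      · exact h1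
    have hGlem : (G : Int) ≤ m := Int.le_of_dvd (by omega) hGm
    -- characterise pyAllDiv for candidates ≥ 2
    have hP : ∀ j : Int, 2 ≤ j → (pyAllDiv values j = true ↔ j ∣ (G : Int)) := by
      intro j _
      rw [pyAllDiv_iff]
      constructor
      · intro h; exact hdvdG j h
      · intro h v hv; exact dvd_trans h (hGdvd v hv)
    have hPfalse : ∀ j : Int, 2 ≤ j → ¬ j ∣ (G : Int) → pyAllDiv values j = false := by
      intro j hj hnd
      cases hb : pyAllDiv values j
      · rfl
      · exact absurd ((hP j hj).mp hb) hnd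
    simp only [hfold]
    by_cases hGeq1 : G = 1
    · -- no common factor ≥ 2: both none
      have hA : loopA values 2 (m - 1).toNat = none := by
        apply loopA_none
        intro j h2j _
        apply hPfalse j h2j
        intro hdvd
        have := Int.le_of_dvd (by rw [hGeq1]; norm_num) hdvd
        rw [hGeq1] at this
        omega
      rw [hA, hGeq1]
      symm
      rw [spfLoop_stop]
      · norm_num
      · intro j hj hjj _
        have : 2 * j ≤ j * j := by nlinarith [mul_nonneg (by omega : (0:Int) ≤ j - 2) (by omega : (0:Int) ≤ j)]
        omega
      · norm_num
      · norm_num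
      · norm_num
    · -- G ≥ 2: both return minFac G (as Int), via the sqrt trick on B's side
      have hG2 : 2 ≤ G := by omega
      set p : Nat := Nat.minFac G with hp
      have hpdvd : (p : Int) ∣ (G : Int) := Int.natCast_dvd_natCast.mpr (Nat.minFac_dvd G)
      have hp2 : 2 ≤ p := (Nat.minFac_prime (by omega)).two_le
      have hpleG : p ≤ G := Nat.minFac_le (by omega)
      have hminp : ∀ j : Int, 2 ≤ j → j < (p : Int) → ¬ j ∣ (G : Int) := by
        intro j h2j hjp hdvd
        have hj0 : 0 ≤ j := by omega
        obtain ⟨jn, rfl⟩ := Int.eq_ofNat_of_zero_le hj0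
        have : p ≤ jn := Nat.minFac_le_of_dvd (by exact_mod_cast h2j)
          (Int.natCast_dvd_natCast.mp hdvd)
        exact_mod_cast absurd hjp (by push_neg; exact_mod_cast this)
      have hA : loopA values 2 (m - 1).toNat = some (p : Int) := by
        apply loopA_found values (p : Int) ((hP _ (by exact_mod_cast hp2)).mpr hpdvd)
          (fun j h2j hjp => hPfalse j h2j (hminp j h2j hjp))
        · norm_num
        · exact_mod_cast hp2
        · have : (p : Int) ≤ m := le_trans (by exact_mod_cast hpleG) hGlem
          omega
      rw [hA]
      by_cases hsq : (p : Int) * (p : Int) ≤ (G : Int)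
      · -- B finds p by trial division
        rw [spfLoop_found (G : Int) (p : Int) (by exact_mod_cast hp2) hsq hpdvd hminp
          _ 2 (by norm_num) (by exact_mod_cast hp2) (by push_cast; omega)]
      · -- p * p > G forces p = G; B returns g itself
        have hpeq : p = G := by
          by_contra hne'
          have hplt : p < G := lt_of_le_of_ne hpleG hne'
          obtain ⟨q, hq⟩ := Nat.minFac_dvd G
          have hq0 : q ≠ 0 := by intro h0; rw [h0, Nat.mul_zero] at hq; omega
          have hq1 : q ≠ 1 := by intro h0; rw [h0, Nat.mul_one] at hq; omega
          have hq2 : 2 ≤ q := by omega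
          have hpq : p ≤ q := Nat.minFac_le_of_dvd hq2 ⟨p, by rw [hq, Nat.mul_comm]⟩
          have : p * p ≤ G := by calc p * p ≤ p * q := Nat.mul_le_mul_left p hpq
                                   _ = G := hq.symm
          exact hsq (by exact_mod_cast this)
        have hB : spfLoop ((G : Nat) : Int) 2 (((G : Nat) : Int).toNat + 1) = some (G : Int) := by
          rw [spfLoop_stop _ ?_ _ 2 (by norm_num) (by omega) (by push_cast; omega)]
          · rw [if_pos (by exact_mod_cast hG2)]
          · intro j h2j hjj hdvd
            have hjge : (p : Int) ≤ j := by
              by_contra h; exact (hminp j h2j (by omega)) hdvd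
            have hGj : (G : Int) ≤ j := by rw [hpeq] at hjge; exact hjge
            have : 2 * j ≤ j * j := by nlinarith [mul_nonneg (by omega : (0:Int) ≤ j - 2) (by omega : (0:Int) ≤ j)]
            omega
        rw [hB, hpeq]
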